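-- pv_equiv track=rewrite | github.com/AndyZhou952/vllm-omni | vllm_omni/diffusion/lora/loader.py | _detect_lora_format
-- ===== SOURCE A (Python) =====
-- from typing import Any
--
-- def _detect_lora_format(state_dict: dict[str, Any]) -> str:
--     """Detect the format of LoRA weights."""
--     keys = list(state_dict.keys())
--
--     # lightx2v distilled format markers
--     has_alpha = any(k.endswith(".alpha") for k in keys)
--     has_lora_unet = any(k.startswith("lora_unet_") for k in keys)
--     has_diffusion_model = any(k.startswith("diffusion_model.") for k in keys)
--     has_lora_down = any(".lora_down.weight" in k for k in keys)
--
--     if has_alpha or has_lora_unet or has_diffusion_model or has_lora_down: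
--         return "non_diffusers"
--
--     # PEFT/diffusers format (already has lora_A/lora_B)
--     if any(".lora_A.weight" in k or ".lora_B.weight" in k for k in keys):
--         return "peft"
--
--     return "unknown"
-- ===== SOURCE B (Python) =====
-- from typing import Any
--
-- def _detect_lora_format(state_dict: dict[str, Any]) -> str:
--     """Detect the format of LoRA weights (single-pass version)."""
--     saw_peft = False
--     for k in state_dict.keys():
--         if (k.endswith(".alpha") or k.startswith("lora_unet_")
--                 or k.startswith("diffusion_model.") or ".lora_down.weight" in k):
--             return "non_diffusers"
--         if ".lora_A.weight" in k or ".lora_B.weight" in k: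
--             saw_peft = True
--     return "peft" if saw_peft else "unknown"
-- ===== Notes on version B (the rewrite author's own statement) =====
-- stated objective: simpler
-- what changed: Replaces five separate any() scans over the keys with one loop that returns 'non_diffusers' as soon as any marker key is seen and otherwise accumulates a saw_peft flag.
import Mathlib
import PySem

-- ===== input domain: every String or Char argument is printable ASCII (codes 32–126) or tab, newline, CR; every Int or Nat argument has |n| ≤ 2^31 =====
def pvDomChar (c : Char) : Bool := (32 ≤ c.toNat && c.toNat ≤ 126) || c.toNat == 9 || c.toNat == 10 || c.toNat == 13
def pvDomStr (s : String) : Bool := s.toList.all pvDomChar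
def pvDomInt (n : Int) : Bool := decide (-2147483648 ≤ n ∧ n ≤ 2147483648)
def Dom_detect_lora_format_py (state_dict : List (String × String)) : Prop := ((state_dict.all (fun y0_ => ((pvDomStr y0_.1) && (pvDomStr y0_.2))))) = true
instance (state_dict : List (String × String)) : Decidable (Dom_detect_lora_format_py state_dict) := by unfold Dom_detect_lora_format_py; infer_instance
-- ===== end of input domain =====

-- B fuses A's five separate any() scans into one early-returning loop over the keys; objective: simpler.

-- B fuses A's five separate any() scans into one early-returning loop over the keys; objective: simpler.

-- ===== PORT A =====
def detect_lora_format_py (state_dict : List (String × String)) : String :=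
  let keys := (PySem.Dict.mk state_dict).keys
  let has_alpha := keys.any (fun k => PySem.Str.endswith k ".alpha")
  let has_lora_unet := keys.any (fun k => PySem.Str.startswith k "lora_unet_")
  let has_diffusion_model := keys.any (fun k => PySem.Str.startswith k "diffusion_model.")
  let has_lora_down := keys.any (fun k => PySem.Str.isIn ".lora_down.weight" k)
  if has_alpha || has_lora_unet || has_diffusion_model || has_lora_down then "non_diffusers"
  else if keys.any (fun k => PySem.Str.isIn ".lora_A.weight" k || PySem.Str.isIn ".lora_B.weight" k) then "peft"
  else "unknown"

-- ===== PORT B =====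
-- the two branch conditions of Source B's loop body, named for readability
def isNonDiffusersKey (k : String) : Bool :=
  PySem.Str.endswith k ".alpha" || PySem.Str.startswith k "lora_unet_"
    || PySem.Str.startswith k "diffusion_model." || PySem.Str.isIn ".lora_down.weight" k

def isPeftKey (k : String) : Bool :=
  PySem.Str.isIn ".lora_A.weight" k || PySem.Str.isIn ".lora_B.weight" k

-- the for-loop of Source B: early return "non_diffusers", else carry the saw_peft flag
def detectLoop : List String → Bool → String
  | [], saw_peft => if saw_peft then "peft" else "unknown"
  | k :: rest, saw_peft =>
    if isNonDiffusersKey k then "non_diffusers"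
    else detectLoop rest (saw_peft || isPeftKey k)

def detect_lora_format_py_alt (state_dict : List (String × String)) : String :=
  detectLoop (PySem.Dict.mk state_dict).keys false

-- ===== PRECONDITION & SPEC =====
def Spec_detect_lora_format_py (state_dict : List (String × String)) (out : String) : Prop := out = detect_lora_format_py_alt state_dict
instance (state_dict : List (String × String)) (out : String) : Decidable (Spec_detect_lora_format_py state_dict out) := by unfold Spec_detect_lora_format_py; infer_instance

-- ===== CLAIM (what is proved, stated in full; the proofs are below) =====
def Claim_equal_detect_lora_format_py : Prop := ∀ (state_dict : List (String × String)), Dom_detect_lora_format_py state_dict → Spec_detect_lora_format_py state_dict (detect_lora_format_py state_dict)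

-- ===== LEMMAS AND PROOFS =====
theorem any_or {α : Type} (l : List α) (p q : α → Bool) :
    l.any (fun x => p x || q x) = (l.any p || l.any q) := by
  induction l with
  | nil => simp
  | cons x xs ih =>
    simp only [List.any_cons, ih]
    cases p x <;> cases q x <;> simp

-- characterisation of Source B's loop: early-return fused scan = A's "check all, then decide"
theorem detectLoop_eq (keys : List String) (saw : Bool) :
    detectLoop keys saw =
      if keys.any isNonDiffusersKey then "non_diffusers"
      else if saw || keys.any isPeftKey then "peft"
      else "unknown" := by
  induction keys generalizing saw with
  | nil => simp [detectLoop]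
  | cons k rest ih =>
    simp only [detectLoop, List.any_cons, ih]
    cases hnd : isNonDiffusersKey k <;> simp [Bool.or_assoc]

-- ===== VERDICT (by name: the statement is the Claim_ definition above) =====
theorem detect_lora_format_py_spec : Claim_equal_detect_lora_format_py := by
  intro state_dict _
  show detect_lora_format_py state_dict = detect_lora_format_py_alt state_dict
  unfold detect_lora_format_py detect_lora_format_py_alt
  rw [detectLoop_eq, Bool.false_or]
  have h1 : ((PySem.Dict.mk state_dict).keys.any isNonDiffusersKey)
      = (((PySem.Dict.mk state_dict).keys.any (fun k => PySem.Str.endswith k ".alpha")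
        || (PySem.Dict.mk state_dict).keys.any (fun k => PySem.Str.startswith k "lora_unet_")
        || (PySem.Dict.mk state_dict).keys.any (fun k => PySem.Str.startswith k "diffusion_model."))
        || (PySem.Dict.mk state_dict).keys.any (fun k => PySem.Str.isIn ".lora_down.weight" k)) := by
    rw [show isNonDiffusersKey = (fun k => PySem.Str.endswith k ".alpha"
        || PySem.Str.startswith k "lora_unet_" || PySem.Str.startswith k "diffusion_model."
        || PySem.Str.isIn ".lora_down.weight" k) from rfl, any_or, any_or, any_or]
  have h2 : ((PySem.Dict.mk state_dict).keys.any isPeftKey)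
      = (PySem.Dict.mk state_dict).keys.any
          (fun k => PySem.Str.isIn ".lora_A.weight" k || PySem.Str.isIn ".lora_B.weight" k) := rfl
  rw [h1, h2]
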